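-- pv_equiv track=rewrite | github.com/VityasZV/Python-tasks | homework-3/FindRect.py | check_rect
-- ===== SOURCE A (Python) =====
-- def check_rect(point_or_line, prev_string, string):
--     amount_of_rectangles = 0
--     is_rect_started = 0
--     for elem in zip(prev_string, string):
--         if elem[0] == "#" and elem[1] == point_or_line:
--             is_rect_started = 1
--         elif is_rect_started:
--             amount_of_rectangles += 1
--             is_rect_started = 0
--     return amount_of_rectangles
-- ===== SOURCE B (Python) =====
-- def check_rect(point_or_line, prev_string, string):
--     m = [p == "#" and s == point_or_line for p, s in zip(prev_string, string)]
--     return sum(a and not b for a, b in zip(m, m[1:]))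
-- ===== Notes on version B (the rewrite author's own statement) =====
-- stated objective: simpler
-- what changed: Replaces the stateful is_rect_started flag machine with building the boolean match sequence once and counting True->False adjacent transitions via zip(m, m[1:]); a trailing True run contributes no pair, matching A's unterminated-run behaviour.
import Mathlib
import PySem

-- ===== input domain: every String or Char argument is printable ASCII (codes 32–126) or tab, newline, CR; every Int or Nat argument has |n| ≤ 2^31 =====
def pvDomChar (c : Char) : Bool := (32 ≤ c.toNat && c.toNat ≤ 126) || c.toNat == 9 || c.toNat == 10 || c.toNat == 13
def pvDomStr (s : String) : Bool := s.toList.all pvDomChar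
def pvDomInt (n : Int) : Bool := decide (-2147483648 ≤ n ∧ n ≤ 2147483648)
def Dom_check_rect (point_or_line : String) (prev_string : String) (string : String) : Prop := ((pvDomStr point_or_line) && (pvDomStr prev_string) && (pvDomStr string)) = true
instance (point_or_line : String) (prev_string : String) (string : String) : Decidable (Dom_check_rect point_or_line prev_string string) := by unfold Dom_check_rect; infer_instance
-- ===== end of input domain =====

-- B replaces A's is_rect_started state machine by building the boolean match list once and
-- counting True->False adjacent transitions (simpler decomposition; same cost).

-- ===== PORT A =====
-- for-loop over zip(prev_string, string) carrying (amount_of_rectangles, is_rect_started)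
def check_rect (point_or_line : String) (prev_string : String) (string : String) : Int :=
  let st := (prev_string.toList.zip string.toList).foldl
    (fun (st : Int × Int) elem =>
      if String.ofList [elem.1] == "#" && String.ofList [elem.2] == point_or_line then
        (st.1, 1)
      else if st.2 ≠ 0 then
        (st.1 + 1, 0)
      else st)
    (0, 0)
  st.1

-- ===== PORT B =====
-- m = [p == "#" and s == point_or_line for p, s in zip(prev_string, string)]
-- return sum(a and not b for a, b in zip(m, m[1:]))
def check_rect_alt (point_or_line : String) (prev_string : String) (string : String) : Int :=
  let m := (prev_string.toList.zip string.toList).map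
    (fun e => String.ofList [e.1] == "#" && String.ofList [e.2] == point_or_line)
  ((m.zip (m.drop 1)).map (fun p => if p.1 && !p.2 then (1 : Int) else 0)).sum

-- ===== PRECONDITION & SPEC =====
def Spec_check_rect (point_or_line : String) (prev_string : String) (string : String) (out : Int) : Prop := out = check_rect_alt point_or_line prev_string string
instance (point_or_line : String) (prev_string : String) (string : String) (out : Int) : Decidable (Spec_check_rect point_or_line prev_string string out) := by unfold Spec_check_rect; infer_instance

-- ===== CLAIM (what is proved, stated in full; the proofs are below) =====
def Claim_equal_check_rect : Prop := ∀ (point_or_line : String) (prev_string : String) (string : String), Dom_check_rect point_or_line prev_string string → Spec_check_rect point_or_line prev_string string (check_rect point_or_line prev_string string)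

-- ===== LEMMAS AND PROOFS =====

-- h prev m = number of True->False transitions in prev :: m (reading consecutive pairs)
def pvH (prev : Bool) : List Bool → Int
  | [] => 0
  | b :: t => (if prev && !b then 1 else 0) + pvH b t

-- A's fold, abstracted over the match list, equals the accumulator plus pvH of the flag.
theorem pvA_fold_eq (m : List Bool) : ∀ (c : Int) (s : Int),
    (m.foldl (fun (st : Int × Int) b =>
      if b then (st.1, 1) else if st.2 ≠ 0 then (st.1 + 1, 0) else st) (c, s)).1
    = c + pvH (s ≠ 0) m := by
  induction m with
  | nil => intro c s; simp [pvH]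
  | cons b t ih =>
    intro c s
    rw [List.foldl_cons]
    cases b
    · have hred : (if (false = true) then (((c, s) : Int × Int).1, (1 : Int))
          else if ((c, s) : Int × Int).2 ≠ 0 then ((c, s).1 + 1, 0) else (c, s))
          = if s ≠ 0 then (c + 1, 0) else (c, s) := by
        split_ifs <;> simp_all
      rw [hred]
      by_cases hs : s ≠ 0
      · rw [if_pos hs, ih]
        simp [pvH, hs]
        ring
      · rw [if_neg hs, ih]
        simp only [ne_eq, not_not] at hs
        subst hs
        simp [pvH]
    · have hred : (if (true = true) then (((c, s) : Int × Int).1, (1 : Int))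
          else if ((c, s) : Int × Int).2 ≠ 0 then ((c, s).1 + 1, 0) else (c, s))
          = (c, 1) := by simp
      rw [hred, ih]
      simp [pvH]

-- A's fold over the zipped list is the abstract fold over the mapped match list.
theorem pvA_map (f : Char × Char → Bool) (L : List (Char × Char)) : ∀ (st : Int × Int),
    L.foldl (fun (st : Int × Int) elem =>
      if f elem then (st.1, 1) else if st.2 ≠ 0 then (st.1 + 1, 0) else st) st
    = (L.map f).foldl (fun (st : Int × Int) b =>
      if b then (st.1, 1) else if st.2 ≠ 0 then (st.1 + 1, 0) else st) st := by
  induction L with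
  | nil => intro st; simp
  | cons e t ih =>
    intro st
    rw [List.map_cons, List.foldl_cons, List.foldl_cons]
    exact ih _

-- B's pair sum equals pvH with the head as the initial previous element.
theorem pvB_pairs (t : List Bool) : ∀ (a : Bool),
    (((a :: t).zip t).map (fun p : Bool × Bool => if p.1 && !p.2 then (1 : Int) else 0)).sum
    = pvH a t := by
  induction t with
  | nil => intro a; simp [pvH]
  | cons b t ih =>
    intro a
    simp only [List.zip_cons_cons, List.map_cons, List.sum_cons, ih, pvH]

theorem pvB_sum (m : List Bool) :
    ((m.zip (m.drop 1)).map (fun p : Bool × Bool => if p.1 && !p.2 then (1 : Int) else 0)).sum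
    = pvH false m := by
  cases m with
  | nil => simp [pvH]
  | cons a t => simpa [pvH] using pvB_pairs t a

-- ===== VERDICT (by name: the statement is the Claim_ definition above) =====
theorem check_rect_spec : Claim_equal_check_rect := by
  intro pol prev s _
  unfold Spec_check_rect check_rect check_rect_alt
  rw [pvA_map (fun e => String.ofList [e.1] == "#" && String.ofList [e.2] == pol), pvA_fold_eq, pvB_sum]
  simp
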